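-- pv_equiv track=rewrite | github.com/diazmx/tesis-code | 01-exp/S01/pmtools2.py | get_false_pos
-- ===== SOURCE A (Python) =====
-- def get_false_pos(neg_entries, policy):
--     #TODO revisar
--     false_pos = []
--
--     for entry in neg_entries:
--
--         #Check access for each rule
--         denies_count = 0
--
--         for rule in policy:
--
--             res = True
--             for att_idx in rule.keys():
--
--                 if entry[att_idx] != rule[att_idx]:
--                     res = False
--                     break
--
--             if res == False:
--                 denies_count += 1
--
--         if denies_count < len(policy):
--             false_pos.append(entry)
--
--     return false_pos
-- ===== SOURCE B (Python) =====
-- def get_false_pos(neg_entries, policy):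
--     # Rule-major sweep: each rule marks the entries it matches in a boolean
--     # mask; the result is the entries whose mask bit is set.
--     matched = [False] * len(neg_entries)
--     for rule in policy:
--         items = list(rule.items())
--         matched = [all(entry[k] == v for k, v in items) or m
--                    for entry, m in zip(neg_entries, matched)]
--     return [entry for entry, m in zip(neg_entries, matched) if m]
-- ===== Notes on version B (the rewrite author's own statement) =====
-- stated objective: alternative
-- what changed: A counts, per entry, how many rules deny it and keeps the entry if denies_count < len(policy); B sweeps rule-major, marking matched entries in a boolean mask, and returns the entries whose mask bit is set.
import Mathlib
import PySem

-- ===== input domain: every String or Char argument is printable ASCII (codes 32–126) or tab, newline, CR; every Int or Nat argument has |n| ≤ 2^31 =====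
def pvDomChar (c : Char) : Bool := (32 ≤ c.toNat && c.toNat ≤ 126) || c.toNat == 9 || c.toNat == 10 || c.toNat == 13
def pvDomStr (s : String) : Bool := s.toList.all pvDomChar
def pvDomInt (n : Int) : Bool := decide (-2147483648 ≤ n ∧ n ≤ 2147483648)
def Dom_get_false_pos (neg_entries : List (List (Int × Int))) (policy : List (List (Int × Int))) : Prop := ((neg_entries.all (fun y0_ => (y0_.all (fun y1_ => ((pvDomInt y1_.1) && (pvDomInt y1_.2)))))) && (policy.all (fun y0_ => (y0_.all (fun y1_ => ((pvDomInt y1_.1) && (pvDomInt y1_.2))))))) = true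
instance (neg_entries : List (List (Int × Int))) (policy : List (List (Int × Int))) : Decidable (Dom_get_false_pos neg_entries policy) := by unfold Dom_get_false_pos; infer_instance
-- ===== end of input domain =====

-- B replaces A's entry-major denies-counting with a rule-major sweep that marks matched entries in a boolean mask (alternative decomposition, same cost).


-- ===== PORT A =====
-- inner 'for att_idx in rule.keys(): if entry[att_idx] != rule[att_idx]: res = False; break'
-- (entry[k] is a dict lookup; total here via getD — Pre_ excludes the KeyError inputs)
def gfpRes (entry : List (Int × Int)) : List (Int × Int) → Bool
  | [] => true
  | (k, v) :: rest =>
      if (PySem.Dict.mk entry).getD k 0 ≠ v then false else gfpRes entry rest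

-- 'denies_count' accumulated over the policy
def gfpDenies (entry : List (Int × Int)) (policy : List (List (Int × Int))) : Int :=
  policy.foldl (fun c rule => if gfpRes entry rule = false then c + 1 else c) 0

def get_false_pos (neg_entries : List (List (Int × Int))) (policy : List (List (Int × Int))) : List (List (Int × Int)) :=
  neg_entries.foldl
    (fun acc entry =>
      if gfpDenies entry policy < (policy.length : Int) then acc ++ [entry] else acc)
    []

-- ===== PORT B =====
-- 'all(entry[k] == v for k, v in items)'
def gfpMatch (entry : List (Int × Int)) (rule : List (Int × Int)) : Bool :=
  rule.all (fun p => (PySem.Dict.mk entry).getD p.1 0 == p.2)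

def get_false_pos_alt (neg_entries : List (List (Int × Int))) (policy : List (List (Int × Int))) : List (List (Int × Int)) :=
  let matched := policy.foldl
    (fun m rule => (neg_entries.zip m).map (fun p => gfpMatch p.1 rule || p.2))
    (neg_entries.map (fun _ => false))
  ((neg_entries.zip matched).filter (fun p => p.2)).map (fun p => p.1)

-- ===== PRECONDITION & SPEC =====
-- Pre_ is exactly where Python A returns (no KeyError): whenever the inner loop reaches
-- position i of a rule (all earlier rule attributes matched the entry), that attribute
-- key is present in the entry.
def Pre_get_false_pos (neg_entries : List (List (Int × Int))) (policy : List (List (Int × Int))) : Prop :=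
  ∀ entry ∈ neg_entries, ∀ rule ∈ policy, ∀ i < rule.length,
    (∀ j < i, (PySem.Dict.mk entry).get? (rule.getD j (0, 0)).1 = some (rule.getD j (0, 0)).2) →
    ((PySem.Dict.mk entry).get? (rule.getD i (0, 0)).1).isSome = true
instance (neg_entries : List (List (Int × Int))) (policy : List (List (Int × Int))) : Decidable (Pre_get_false_pos neg_entries policy) := by unfold Pre_get_false_pos; infer_instance

def pvWitness_get_false_pos : (List (List (Int × Int))) × (List (List (Int × Int))) :=
  ([[(1, 2)], [(1, 3), (4, 5)]], [[(1, 2)], [(1, 3)]])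

def Spec_get_false_pos (neg_entries : List (List (Int × Int))) (policy : List (List (Int × Int))) (out : List (List (Int × Int))) : Prop := out = get_false_pos_alt neg_entries policy
instance (neg_entries : List (List (Int × Int))) (policy : List (List (Int × Int))) (out : List (List (Int × Int))) : Decidable (Spec_get_false_pos neg_entries policy out) := by unfold Spec_get_false_pos; infer_instance

-- ===== CLAIM (what is proved, stated in full; the proofs are below) =====
def Claim_equal_get_false_pos : Prop := ∀ (neg_entries : List (List (Int × Int))) (policy : List (List (Int × Int))), Dom_get_false_pos neg_entries policy → Pre_get_false_pos neg_entries policy → Spec_get_false_pos neg_entries policy (get_false_pos neg_entries policy)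

-- ===== LEMMAS AND PROOFS =====

-- the break-style inner loop computes 'all attributes match'
theorem gfpRes_eq_match (entry : List (Int × Int)) (rule : List (Int × Int)) :
    gfpRes entry rule = gfpMatch entry rule := by
  induction rule with
  | nil => rfl
  | cons p rest ih =>
    obtain ⟨k, v⟩ := p
    simp only [gfpRes, gfpMatch, List.all_cons]
    by_cases h : (PySem.Dict.mk entry).getD k 0 = v
    · simp [h, ih, gfpMatch]
    · simp [h]

theorem gfpDenies_lt_iff (entry : List (Int × Int)) (policy : List (List (Int × Int))) :
    gfpDenies entry policy < (policy.length : Int) ↔ policy.any (fun r => gfpMatch entry r) = true := by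
  unfold gfpDenies
  have h1 : (fun (c : Int) rule => if gfpRes entry rule = false then c + 1 else c)
      = (fun (c : Int) rule => if (fun r => !gfpRes entry r) rule = true then c + 1 else c) := by
    funext c r; cases h : gfpRes entry r <;> simp [h]
  rw [h1, PySem.List.foldl_count_if]
  simp only [zero_add]
  have hle := List.countP_le_length (p := fun r => !gfpRes entry r) (l := policy)
  rw [List.any_eq_true]
  constructor
  · intro hlt
    by_contra hno
    push Not at hno
    have : policy.countP (fun r => !gfpRes entry r) = policy.length :=
      List.countP_eq_length.mpr (by intro r hr; simp [gfpRes_eq_match, hno r hr])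
    omega
  · rintro ⟨r, hr, hm⟩
    have hne : policy.countP (fun r => !gfpRes entry r) ≠ policy.length := by
      intro hc
      have := List.countP_eq_length.mp hc r hr
      simp [gfpRes_eq_match, hm] at this
    omega

-- zip a list with a pointwise map of itself
theorem zip_map_self {α β : Type} (xs : List α) (g : α → β) :
    xs.zip (xs.map g) = xs.map (fun x => (x, g x)) := by
  induction xs with
  | nil => rfl
  | cons x xs ih => simp [ih]

-- mask invariant of B's rule-major fold
theorem mask_fold (neg : List (List (Int × Int))) (policy : List (List (Int × Int)))
    (g : List (Int × Int) → Bool) :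
    policy.foldl (fun m rule => (neg.zip m).map (fun p => gfpMatch p.1 rule || p.2)) (neg.map g)
      = neg.map (fun e => policy.any (fun r => gfpMatch e r) || g e) := by
  induction policy generalizing g with
  | nil => simp
  | cons r rs ih =>
    simp only [List.foldl_cons, zip_map_self, List.map_map]
    rw [show ((fun p : (List (Int × Int)) × Bool => gfpMatch p.1 r || p.2) ∘ fun x => (x, g x))
          = fun e => gfpMatch e r || g e from rfl]
    rw [ih]
    apply List.map_congr_left
    intro e _
    simp [Bool.or_assoc, Bool.or_comm]

-- ===== VERDICT (by name: the statement is the Claim_ definition above) =====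
theorem get_false_pos_spec : Claim_equal_get_false_pos := by
  intro neg policy _ _
  simp only [Spec_get_false_pos, get_false_pos, get_false_pos_alt]
  simp only [gfpDenies_lt_iff]
  rw [PySem.List.foldl_append_if, mask_fold, zip_map_self, List.filter_map, List.map_map]
  simp [Function.comp_def]
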